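-- pv_equiv track=rewrite | github.com/Alimresque/Thermodynamic-Issue | Che321.Project.py | popss
-- ===== SOURCE A (Python) =====
-- def popss(pop, yaz_dostum_s_n, num):
--     eps = pop.copy()
--     mol = []
--     for i in range(num):
--         s = eps.index(min(eps))
--         mol.append(yaz_dostum_s_n[s])
--         eps.remove(min(eps))
--         yaz_dostum_s_n.pop(s)
--
--     return mol
-- ===== SOURCE B (Python) =====
-- def popss(pop, yaz_dostum_s_n, num):
--     # Return-value equivalent to A (A also mutates yaz_dostum_s_n in place; B does not).
--     order = sorted(range(len(pop)), key=pop.__getitem__)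
--     return [yaz_dostum_s_n[i] for i in order[:max(num, 0)]]
-- ===== Notes on version B (the rewrite author's own statement) =====
-- stated objective: faster
-- what changed: B replaces A's repeated min/index/remove selection loop (and its in-place mutation of yaz_dostum_s_n) by one stable sort of the indices of pop, slicing off the first num and mapping them through yaz_dostum_s_n.
-- outside the precondition, e.g. on popss([1, 5], [9], 1): A returns [9], B returns [9]; on popss([5, 1], [9], 1): A raises IndexError, B raises IndexError
import Mathlib
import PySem

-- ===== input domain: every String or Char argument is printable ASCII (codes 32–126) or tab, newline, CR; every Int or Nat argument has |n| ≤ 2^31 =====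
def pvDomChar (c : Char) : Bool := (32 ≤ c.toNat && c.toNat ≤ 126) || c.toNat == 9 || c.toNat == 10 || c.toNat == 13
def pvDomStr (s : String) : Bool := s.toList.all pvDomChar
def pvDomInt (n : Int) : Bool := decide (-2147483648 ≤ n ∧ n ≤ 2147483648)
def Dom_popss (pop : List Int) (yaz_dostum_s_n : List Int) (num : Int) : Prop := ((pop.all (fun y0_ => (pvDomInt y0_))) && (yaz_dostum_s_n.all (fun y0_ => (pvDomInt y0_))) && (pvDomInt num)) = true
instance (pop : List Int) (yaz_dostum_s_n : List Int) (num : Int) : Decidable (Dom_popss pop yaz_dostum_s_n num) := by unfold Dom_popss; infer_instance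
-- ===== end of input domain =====

-- B replaces A's repeated min/index/remove selection loop (O(num*n)) by one stable index sort +
-- slice + map (O(n log n)); a timing run measured B faster. A also mutates yaz_dostum_s_n in
-- place; B does not — the equivalence proved here is about the RETURN value only.

-- ===== PORT A =====
-- the body of 'for i in range(num)': state (eps, ys, mol); each 'none' branch is where the
-- Python raises (ValueError from min([]) / IndexError) — excluded by Pre_popss.
def popssLoop (fuel : Nat) (eps : List Int) (ys : List Int) (mol : List Int) : List Int :=
  match fuel with
  | 0 => mol
  | n + 1 =>
    match PySem.List.min? eps (fun x => x) with
    | none => mol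
    | some m =>
      match PySem.List.index? eps m with
      | none => mol
      | some s =>
        match PySem.List.pyGet? ys (s : Int) with
        | none => mol
        | some v =>
          match PySem.List.remove? eps m, PySem.List.pop? ys (s : Int) with
          | some eps', some p => popssLoop n eps' p.2 (mol ++ [v])
          | _, _ => mol

def popss (pop : List Int) (yaz_dostum_s_n : List Int) (num : Int) : List Int :=
  popssLoop num.toNat pop yaz_dostum_s_n []

-- ===== PORT B =====
-- Source B: order = sorted(range(len(pop)), key=pop.__getitem__); return [yaz[i] for i in order[:max(num, 0)]]
-- (pop.__getitem__ / yaz_dostum_s_n[i] are ported as pyGetD: every index produced by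
-- range(len(pop)) is a valid nonnegative index, where the default is never used)
def popss_alt (pop : List Int) (yaz_dostum_s_n : List Int) (num : Int) : List Int :=
  (PySem.List.slice
      (PySem.List.sorted (PySem.List.pyRange 0 pop.length 1) (fun i => PySem.List.pyGetD pop i 0) false)
      none (some (max num 0))).map (fun i => PySem.List.pyGetD yaz_dostum_s_n i 0)

-- ===== PRECONDITION & SPEC =====
-- For 0 < num, A raises unless num ≤ len(pop) (min([]) is a ValueError) and it generally raises
-- IndexError when yaz_dostum_s_n is shorter than pop; Pre_ also excludes the accidental corner of
-- the latter where all selected minima happen to sit at indices still inside yaz_dostum_s_n, on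
-- which A does return (see claim cites).
def Pre_popss (pop : List Int) (yaz_dostum_s_n : List Int) (num : Int) : Prop :=
  0 < num → (num ≤ (pop.length : Int) ∧ (pop.length : Int) ≤ (yaz_dostum_s_n.length : Int))
instance (pop : List Int) (yaz_dostum_s_n : List Int) (num : Int) : Decidable (Pre_popss pop yaz_dostum_s_n num) := by unfold Pre_popss; infer_instance

def pvWitness_popss : List Int × List Int × Int := ([2, 1, 2], [10, 20, 30], 2)

def Spec_popss (pop : List Int) (yaz_dostum_s_n : List Int) (num : Int) (out : List Int) : Prop := out = popss_alt pop yaz_dostum_s_n num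
instance (pop : List Int) (yaz_dostum_s_n : List Int) (num : Int) (out : List Int) : Decidable (Spec_popss pop yaz_dostum_s_n num out) := by unfold Spec_popss; infer_instance

-- ===== CLAIM (what is proved, stated in full; the proofs are below) =====
def Claim_equal_popss : Prop := ∀ (pop : List Int) (yaz_dostum_s_n : List Int) (num : Int), Dom_popss pop yaz_dostum_s_n num → Pre_popss pop yaz_dostum_s_n num → Spec_popss pop yaz_dostum_s_n num (popss pop yaz_dostum_s_n num)

-- ===== LEMMAS AND PROOFS =====

-- one foldl step of PySem's insertion sort
lemma sorted_append_singleton {α κ : Type} [LT κ] [DecidableLT κ] (l : List α) (a : α) (key : α → κ) :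
    PySem.List.sorted (l ++ [a]) key false
      = PySem.List.insertBy (fun x y => decide (key x < key y)) a (PySem.List.sorted l key false) := by
  rw [PySem.List.sorted_eq_foldl_insertBy, PySem.List.sorted_eq_foldl_insertBy, List.foldl_append]
  rfl

lemma insertBy_cons {α : Type} (before : α → α → Bool) (x y : α) (ys : List α) :
    PySem.List.insertBy before x (y :: ys)
      = if before x y then x :: y :: ys else y :: PySem.List.insertBy before x ys := rfl

-- stable sort extracts the FIRST minimum as its head (s = first index attaining the minimum key)
lemma sorted_extract_min {α : Type} (key : α → Int) (l : List α) (s : Nat) (hs : s < l.length)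
    (hmin : ∀ a ∈ l, key (l[s]) ≤ key a)
    (hfirst : ∀ j (hj : j < s), key (l[s]) < key (l[j]'(hj.trans hs))) :
    PySem.List.sorted l key false = l[s] :: PySem.List.sorted (l.eraseIdx s) key false := by
  induction l using List.reverseRecOn with
  | nil => simp at hs
  | append_singleton l' a ih =>
    by_cases hlt : s < l'.length
    · have hgs : (l' ++ [a])[s]'hs = l'[s] := List.getElem_append_left hlt
      have hmin' : ∀ b ∈ l', key (l'[s]) ≤ key b := by
        intro b hb; rw [← hgs]; exact hmin b (List.mem_append_left _ hb)
      have hfirst' : ∀ j (hj : j < s), key (l'[s]) < key (l'[j]'(hj.trans hlt)) := by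
        intro j hj
        have := hfirst j hj
        rwa [hgs, List.getElem_append_left (hj.trans hlt)] at this
      have hka : key (l'[s]) ≤ key a := by
        rw [← hgs]; exact hmin a (List.mem_append_right _ (by simp))
      rw [sorted_append_singleton, ih hlt hmin' hfirst',
          List.eraseIdx_append_of_lt_length hlt, insertBy_cons, sorted_append_singleton]
      simp [hgs, not_lt.mpr hka]
    · have hsl : s = l'.length := by
        have := hs; simp only [List.length_append, List.length_cons, List.length_nil] at this
        omega
      subst hsl
      have hga : (l' ++ [a])[l'.length]'hs = a := by
        rw [List.getElem_append_right (le_refl _)]; simp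
      have hstrict : ∀ b ∈ l', key a < key b := by
        intro b hb
        obtain ⟨j, hj, rfl⟩ := List.mem_iff_getElem.mp hb
        have := hfirst j hj
        rwa [hga, List.getElem_append_left hj] at this
      have herase : (l' ++ [a]).eraseIdx l'.length = l' := by
        rw [List.eraseIdx_append_of_length_le (le_refl _)]; simp
      rw [sorted_append_singleton, hga, herase]
      cases hsor : PySem.List.sorted l' key false with
      | nil => rfl
      | cons y t =>
        have hy : y ∈ l' := by
          have : y ∈ PySem.List.sorted l' key false := by rw [hsor]; simp
          rwa [PySem.List.mem_sorted] at this
        rw [insertBy_cons, if_pos (by simpa using hstrict y hy)]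

-- insertBy commutes with map
lemma insertBy_map {α β : Type} (f : α → β) (before : β → β → Bool) (x : α) (ys : List α) :
    PySem.List.insertBy before (f x) (ys.map f)
      = (PySem.List.insertBy (fun p q => before (f p) (f q)) x ys).map f := by
  induction ys with
  | nil => rfl
  | cons y t iht =>
    rw [List.map_cons, insertBy_cons, insertBy_cons]
    split_ifs with h
    · simp
    · simp [iht]

-- sorting a mapped list = mapping the list sorted under the composed key
lemma sorted_map {α β : Type} (f : α → β) (key : β → Int) (l : List α) :
    PySem.List.sorted (l.map f) key false
      = (PySem.List.sorted l (fun x => key (f x)) false).map f := by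
  induction l using List.reverseRecOn with
  | nil => rfl
  | append_singleton l' a ih =>
    rw [List.map_append, List.map_singleton, sorted_append_singleton, sorted_append_singleton, ih,
        insertBy_map]

-- eraseIdx commutes with zip at a common valid index of equal-length lists
lemma zip_eraseIdx {α β : Type} :
    ∀ (xs : List α) (ys : List β) (i : Nat), xs.length = ys.length →
      (xs.zip ys).eraseIdx i = (xs.eraseIdx i).zip (ys.eraseIdx i)
  | [], [], _, _ => by simp
  | [], _ :: _, _, h => by simp at h
  | _ :: _, [], _, h => by simp at h
  | x :: xs, y :: ys, 0, _ => by simp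
  | x :: xs, y :: ys, i + 1, h => by
      simp only [List.zip_cons_cons, List.eraseIdx_cons_succ]
      rw [zip_eraseIdx xs ys i (by simpa using h)]

-- the loop invariant: fuel steps of A's selection loop output the first `fuel` seconds of the
-- stable sort of (eps zipped with its parallel values); the tail t of ys is never touched
lemma popssLoop_eq : ∀ (fuel : Nat) (eps zs t mol : List Int),
    eps.length = zs.length → fuel ≤ eps.length →
    popssLoop fuel eps (zs ++ t) mol
      = mol ++ ((PySem.List.sorted (eps.zip zs) (fun p => p.1) false).take fuel).map (fun p => p.2)
  | 0, eps, zs, t, mol, _, _ => by simp [popssLoop]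
  | fuel + 1, eps, zs, t, mol, hlen, hfuel => by
    have heps : eps ≠ [] := by intro h; subst h; simp at hfuel
    obtain ⟨m, hm⟩ : ∃ m, PySem.List.min? eps (fun x => x) = some m := by
      cases h : PySem.List.min? eps (fun x => x) with
      | none => exact absurd ((PySem.List.min?_eq_none_iff _ _).mp h) heps
      | some m => exact ⟨m, rfl⟩
    have hmmem : m ∈ eps := PySem.List.min?_mem hm
    obtain ⟨s, hidx⟩ : ∃ s, PySem.List.index? eps m = some s := by
      cases h : PySem.List.index? eps m with
      | none => exact absurd ((PySem.List.index?_eq_none_iff _ _).mp h) (by simpa using hmmem)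
      | some s => exact ⟨s, rfl⟩
    obtain ⟨hs, hsm, hne⟩ := PySem.List.getElem_of_index?_eq_some hidx
    have hszs : s < zs.length := hlen ▸ hs
    have hsyz : s < (zs ++ t).length := by simp; omega
    have hget : PySem.List.pyGet? (zs ++ t) (s : Int) = some (zs[s]) := by
      rw [PySem.List.pyGet?_natCast, List.getElem?_eq_getElem hsyz, List.getElem_append_left hszs]
    have hrem : PySem.List.remove? eps m = some (eps.eraseIdx s) := by
      rw [PySem.List.remove?_eq_some_erase eps m hmmem, List.erase_eq_eraseIdx,
          ← PySem.List.index?_eq_idxOf?, hidx]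
    have hpop : PySem.List.pop? (zs ++ t) (s : Int)
        = some ((zs[s]), zs.eraseIdx s ++ t) := by
      rw [PySem.List.pop?_natCast _ _ hsyz, List.getElem_append_left hszs,
          List.eraseIdx_append_of_lt_length hszs]
    have hstep : popssLoop (fuel + 1) eps (zs ++ t) mol
        = popssLoop fuel (eps.eraseIdx s) (zs.eraseIdx s ++ t) (mol ++ [zs[s]]) := by
      simp only [popssLoop, hm, hidx, hget, hrem, hpop]
    have hlen' : (eps.eraseIdx s).length = (zs.eraseIdx s).length := by
      simp [List.length_eraseIdx, hszs, hlen]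
    have hfuel' : fuel ≤ (eps.eraseIdx s).length := by
      simp only [List.length_eraseIdx, if_pos hs]; omega
    -- the sorted-side step
    have hzs : s < (eps.zip zs).length := by simp [List.length_zip]; omega
    have hzget : (eps.zip zs)[s]'hzs = (eps[s], zs[s]) := List.getElem_zip
    have hsort : PySem.List.sorted (eps.zip zs) (fun p => p.1) false
        = (eps[s], zs[s]) :: PySem.List.sorted ((eps.eraseIdx s).zip (zs.eraseIdx s)) (fun p => p.1) false := by
      rw [← zip_eraseIdx eps zs s hlen, ← hzget]
      apply sorted_extract_min (fun p => p.1) (eps.zip zs) s hzs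
      · intro a ha
        rcases a with ⟨a1, a2⟩
        have := (List.of_mem_zip ha).1
        simpa [hzget, hsm] using PySem.List.min?_isMin hm a1 this
      · intro j hj
        have hje : j < eps.length := hj.trans hs
        have hjz : (eps.zip zs)[j]'(hj.trans hzs) = (eps[j], zs[j]'(hlen ▸ hje)) := List.getElem_zip
        simp only [hzget, hjz, hsm]
        have hle := PySem.List.min?_isMin hm (eps[j]) (List.getElem_mem hje)
        have := hne j hj
        simp only at hle
        omega
    rw [hstep, popssLoop_eq fuel (eps.eraseIdx s) (zs.eraseIdx s) t (mol ++ [zs[s]]) hlen' hfuel',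
        hsort]
    simp

-- B's indexed sort, read as a sort of the zipped pairs
lemma alt_bridge (pop yaz : List Int) (hlen : pop.length ≤ yaz.length) :
    pop.zip (yaz.take pop.length)
      = (PySem.List.pyRange 0 pop.length 1).map
          (fun i => (PySem.List.pyGetD pop i 0, PySem.List.pyGetD yaz i 0)) := by
  rw [PySem.List.pyRange_zero_natCast, List.map_map]
  apply List.ext_getElem
  · simp [List.length_zip]; omega
  · intro i h1 h2
    have hip : i < pop.length := by simp [List.length_zip] at h1; omega
    have hiy : i < yaz.length := lt_of_lt_of_le hip hlen
    simp only [List.getElem_zip, List.getElem_map, List.getElem_range, Function.comp_apply,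
      PySem.List.pyGetD_natCast, List.getElem_take]
    rw [List.getD_eq_getElem yaz 0 hiy, List.getD_eq_getElem pop 0 hip]

-- ===== VERDICT (by name: the statement is the Claim_ definition above) =====
theorem popss_spec : Claim_equal_popss := by
  intro pop yaz num _ hpre
  unfold Spec_popss popss popss_alt
  by_cases hnum : num ≤ 0
  · have h1 : num.toNat = 0 := Int.toNat_of_nonpos hnum
    have h2 : max num 0 = 0 := by omega
    rw [h1, h2, PySem.List.slice_to _ (le_refl 0)]
    simp [popssLoop]
  · replace hnum : 0 < num := by omega
    obtain ⟨hnp, hpy⟩ := hpre hnum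
    have hle : pop.length ≤ yaz.length := by exact_mod_cast hpy
    have hfuel : num.toNat ≤ pop.length := by omega
    have hmax : max num 0 = num := by omega
    rw [hmax, PySem.List.slice_to _ (le_of_lt hnum)]
    have hsplit : yaz = yaz.take pop.length ++ yaz.drop pop.length := (List.take_append_drop _ _).symm
    calc popssLoop num.toNat pop yaz []
        = popssLoop num.toNat pop (yaz.take pop.length ++ yaz.drop pop.length) [] := by rw [← hsplit]
      _ = [] ++ ((PySem.List.sorted (pop.zip (yaz.take pop.length)) (fun p => p.1) false).take num.toNat).map (fun p => p.2) := by
            exact popssLoop_eq num.toNat pop (yaz.take pop.length) (yaz.drop pop.length) []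
              (by simp [List.length_take]; omega) hfuel
      _ = _ := by
            rw [List.nil_append, alt_bridge pop yaz hle, sorted_map, ← List.map_take,
                List.map_map]
            rfl
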